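-- pv_equiv track=rewrite | github.com/crazybass81/T-Developer | backend/src/genetic/encoder.py | encode_categorical
-- ===== SOURCE A (Python) =====
-- from typing import Any, Dict, List, Union
--
-- def encode_categorical(selected: List[str], categories: List[str]) -> str:
--     """Encode categorical selections as bit string"""
--     encoding = []
--     for category in categories:
--         if category in selected:
--             encoding.append("1")
--         else:
--             encoding.append("0")
--     return "".join(encoding)
-- ===== SOURCE B (Python) =====
-- def encode_categorical(selected, categories):
--     """Encode categorical selections as bit string"""
--     positions = {}
--     for i, category in enumerate(categories):
--         positions.setdefault(category, []).append(i)
--     result = ["0"] * len(categories)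
--     for item in selected:
--         for i in positions.get(item, []):
--             result[i] = "1"
--     return "".join(result)
-- ===== Notes on version B (the rewrite author's own statement) =====
-- stated objective: faster
-- what changed: Replaces the per-category linear membership scan of `selected` with a one-pass index (category -> list of positions) built from `categories`, then marks positions by iterating over `selected`.
import Mathlib
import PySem

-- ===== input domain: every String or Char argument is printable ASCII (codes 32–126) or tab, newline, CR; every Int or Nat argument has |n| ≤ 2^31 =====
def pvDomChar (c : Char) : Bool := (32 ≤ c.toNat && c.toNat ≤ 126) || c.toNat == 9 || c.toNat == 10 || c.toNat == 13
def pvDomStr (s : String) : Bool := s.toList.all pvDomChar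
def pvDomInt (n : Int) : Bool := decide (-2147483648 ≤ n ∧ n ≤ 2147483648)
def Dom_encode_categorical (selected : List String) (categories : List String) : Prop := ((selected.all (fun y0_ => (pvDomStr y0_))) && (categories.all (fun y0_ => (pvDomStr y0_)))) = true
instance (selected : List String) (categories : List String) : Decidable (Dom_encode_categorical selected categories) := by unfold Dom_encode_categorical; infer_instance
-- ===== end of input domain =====

-- B builds a category→positions index once and marks positions from `selected` (O(n+m)) instead of scanning `selected` for every category (O(n·m)).

-- ===== PORT A =====
def encode_categorical (selected : List String) (categories : List String) : String :=
  let encoding := categories.foldl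
    (fun acc category => acc ++ [if selected.contains category then "1" else "0"]) []
  String.join encoding

-- ===== PORT B =====
-- `for i, category in enumerate(categories): positions.setdefault(category, []).append(i)`
def pvBuildPos : List String → Nat → PySem.Dict String (List Nat) → PySem.Dict String (List Nat)
  | [], _, d => d
  | c :: rest, i, d => pvBuildPos rest (i + 1) (d.insert c (d.getD c [] ++ [i]))

def encode_categorical_alt (selected : List String) (categories : List String) : String :=
  let positions := pvBuildPos categories 0 PySem.Dict.empty
  let result := List.replicate categories.length "0"
  let result := selected.foldl
    (fun r item => (positions.getD item []).foldl (fun r i => r.set i "1") r) result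
  String.join result

-- ===== PRECONDITION & SPEC =====
def Spec_encode_categorical (selected : List String) (categories : List String) (out : String) : Prop := out = encode_categorical_alt selected categories
instance (selected : List String) (categories : List String) (out : String) : Decidable (Spec_encode_categorical selected categories out) := by unfold Spec_encode_categorical; infer_instance

-- ===== CLAIM (what is proved, stated in full; the proofs are below) =====
def Claim_equal_encode_categorical : Prop := ∀ (selected : List String) (categories : List String), Dom_encode_categorical selected categories → Spec_encode_categorical selected categories (encode_categorical selected categories)

-- ===== LEMMAS AND PROOFS =====

-- A's loop builds the map of the flag function.
theorem foldl_append_singleton {α β : Type} (f : α → β) (l : List α) (acc : List β) :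
    l.foldl (fun acc c => acc ++ [f c]) acc = acc ++ l.map f := by
  induction l generalizing acc with
  | nil => simp
  | cons c rest ih => simp [List.foldl, ih, List.append_assoc]

-- specification of the positions index
def posSpec : List String → Nat → String → List Nat
  | [], _, _ => []
  | c :: rest, i, s => (if c = s then [i] else []) ++ posSpec rest (i + 1) s

theorem buildPos_getD (l : List String) (i : Nat) (d : PySem.Dict String (List Nat)) (s : String) :
    (pvBuildPos l i d).getD s [] = d.getD s [] ++ posSpec l i s := by
  induction l generalizing i d with
  | nil => simp [pvBuildPos, posSpec]
  | cons c rest ih =>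
    simp only [pvBuildPos, posSpec, ih, PySem.Dict.getD_insert]
    by_cases h : s = c
    · subst h; simp
    · have h' : ¬ c = s := fun hcs => h hcs.symm
      simp [h, h']

theorem mem_posSpec (l : List String) (i : Nat) (s : String) (j : Nat) :
    j ∈ posSpec l i s ↔ ∃ k, j = i + k ∧ l[k]? = some s := by
  induction l generalizing i with
  | nil => simp [posSpec]
  | cons c rest ih =>
    simp only [posSpec, List.mem_append, ih]
    constructor
    · rintro (h | ⟨k, rfl, hk⟩)
      · split_ifs at h with hc
        · simp at h; exact ⟨0, by omega, by simp [h, hc]⟩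
        · simp at h
      · exact ⟨k + 1, by omega, by simpa using hk⟩
    · rintro ⟨k, rfl, hk⟩
      cases k with
      | zero => left; simp at hk; simp [hk]
      | succ k => right; exact ⟨k, by omega, by simpa using hk⟩

theorem foldl_set_length (l : List Nat) (r : List String) :
    (l.foldl (fun r i => r.set i "1") r).length = r.length := by
  induction l generalizing r with
  | nil => rfl
  | cons i rest ih => simp [List.foldl, ih]

theorem foldl_set_getElem? (l : List Nat) (r : List String) (j : Nat) :
    (l.foldl (fun r i => r.set i "1") r)[j]? =
      if j ∈ l ∧ j < r.length then some "1" else r[j]? := by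
  induction l generalizing r with
  | nil => simp
  | cons i rest ih =>
    simp only [List.foldl, ih, List.length_set, List.mem_cons]
    by_cases hlt : j < r.length
    · by_cases hm : j ∈ rest
      · simp [hm, hlt]
      · by_cases hij : j = i
        · subst hij
          simp [hm, hlt, List.getElem?_set]
        · simp [hm, hij, hlt, List.getElem?_set, Ne.symm hij]
    · have e1 : (r.set i "1")[j]? = none := List.getElem?_eq_none (by simp; omega)
      have e2 : r[j]? = none := List.getElem?_eq_none (by omega)
      simp [hlt, e1, e2]

theorem foldl_mark_getElem? (sel : List String) (g : String → List Nat) (r : List String) (j : Nat) :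
    (sel.foldl (fun r item => (g item).foldl (fun r i => r.set i "1") r) r)[j]? =
      if (∃ s ∈ sel, j ∈ g s) ∧ j < r.length then some "1" else r[j]? := by
  induction sel generalizing r with
  | nil => simp
  | cons s rest ih =>
    simp only [List.foldl, ih, foldl_set_length, foldl_set_getElem?, List.mem_cons]
    by_cases hlt : j < r.length
    · by_cases hrest : ∃ t ∈ rest, j ∈ g t
      · have h2 : ∃ t, (t = s ∨ t ∈ rest) ∧ j ∈ g t :=
          ⟨hrest.choose, Or.inr hrest.choose_spec.1, hrest.choose_spec.2⟩
        simp [hrest, hlt, h2]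
      · by_cases hs : j ∈ g s
        · have h2 : ∃ t, (t = s ∨ t ∈ rest) ∧ j ∈ g t := ⟨s, Or.inl rfl, hs⟩
          simp [hrest, hs, hlt, h2]
        · have h2 : ¬ ∃ t, (t = s ∨ t ∈ rest) ∧ j ∈ g t := by
            rintro ⟨t, ht | ht, hj⟩
            · exact hs (ht ▸ hj)
            · exact hrest ⟨t, ht, hj⟩
          simp [hrest, hs, h2]
    · simp [hlt]

-- ===== VERDICT (by name: the statement is the Claim_ definition above) =====
theorem encode_categorical_spec : Claim_equal_encode_categorical := by
  intro selected categories _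
  show _ = _
  unfold encode_categorical encode_categorical_alt
  simp only [foldl_append_singleton, List.nil_append]
  congr 1
  apply List.ext_getElem?
  intro j
  rw [foldl_mark_getElem?]
  have hempty : ∀ s : String, (PySem.Dict.empty : PySem.Dict String (List Nat)).getD s [] = [] := by
    intro s; rfl
  by_cases hlt : j < categories.length
  · have hget : categories[j]? = some categories[j] := List.getElem?_eq_getElem hlt
    have hcond : (∃ s ∈ selected, j ∈ (pvBuildPos categories 0 PySem.Dict.empty).getD s []) ↔
        categories[j] ∈ selected := by
      constructor
      · rintro ⟨s, hs, hj⟩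
        rw [buildPos_getD, hempty, List.nil_append, mem_posSpec] at hj
        obtain ⟨k, hjk, hks⟩ := hj
        have : k = j := by omega
        subst this
        rw [hget] at hks
        exact (Option.some.inj hks) ▸ hs
      · intro hm
        refine ⟨categories[j], hm, ?_⟩
        rw [buildPos_getD, hempty, List.nil_append, mem_posSpec]
        exact ⟨j, by omega, hget⟩
    have hmap : (categories.map fun category =>
        if selected.contains category then "1" else "0")[j]? =
        some (if selected.contains categories[j] then "1" else "0") := by
      simp [List.getElem?_map, hget]
    by_cases hmem : categories[j] ∈ selected
    · have hc : selected.contains categories[j] = true := by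
        simpa [List.contains_iff_mem] using hmem
      simp [hcond, hmem, hlt, hmap, hc]
    · have hc : selected.contains categories[j] = false := by
        simpa [List.contains_iff_mem] using hmem
      simp [hcond, hmem, hlt, hmap, hc]
  · have hget : categories[j]? = none := List.getElem?_eq_none (by omega)
    simp [hlt, hget]
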